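-- pv_equiv track=rewrite | github.com/ayoubzulfiqar/Leetcode-Medium | LongestUnequalAdjacentGroupsSubsequenceII/longest_unequal_adjacent_groups_subsequence_ii.py | longestUnequalAdjacentGroupsSubsequence
-- ===== SOURCE A (Python) =====
-- def longestUnequalAdjacentGroupsSubsequence(words: list[str], groups: list[int]) -> list[str]:
--     n = len(words)
--
--     dp = [1] * n
--     prev = [-1] * n
--
--     def hamming_distance(s1, s2):
--         dist = 0
--         for k in range(len(s1)):
--             if s1[k] != s2[k]:
--                 dist += 1
--         return dist
--
--     for i in range(n):
--         for j in range(i):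
--             if groups[j] != groups[i]:
--                 if len(words[j]) == len(words[i]):
--                     if hamming_distance(words[j], words[i]) == 1:
--                         if dp[j] + 1 > dp[i]:
--                             dp[i] = dp[j] + 1
--                             prev[i] = j
--
--     max_len = 0
--     max_len_idx = -1
--
--     if n > 0:
--         max_len = 1
--         max_len_idx = 0
--         for i in range(n):
--             if dp[i] > max_len:
--                 max_len = dp[i]
--                 max_len_idx = i
--     else:
--         return []
--
--     result_indices = []
--     current_idx = max_len_idx
--     while current_idx != -1:
--         result_indices.append(current_idx)
--         current_idx = prev[current_idx]
--
--     result_indices.reverse()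
--
--     result_words = [words[i] for i in result_indices]
--
--     return result_words
-- ===== SOURCE B (Python) =====
-- def longestUnequalAdjacentGroupsSubsequence(words: list[str], groups: list[int]) -> list[str]:
--     n = len(words)
--     if n == 0:
--         return []
--     dp = [1] * n
--     prev = [-1] * n
--     buckets = {}  # (position k, word with position k deleted) -> indices, ascending
--     for i in range(n):
--         w = words[i]
--         g = groups[i]
--         best_d = 0
--         best_j = -1
--         for k in range(len(w)):
--             key = (k, w[:k] + w[k + 1:])
--             for j in buckets.get(key, []):
--                 # same key => equal length and equal off position k, so
--                 # words[j] != w means Hamming distance exactly 1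
--                 if words[j] != w and groups[j] != g:
--                     if dp[j] > best_d or (dp[j] == best_d and j < best_j):
--                         best_d, best_j = dp[j], j
--         if best_j != -1:
--             dp[i] = best_d + 1
--             prev[i] = best_j
--         for k in range(len(w)):
--             key = (k, w[:k] + w[k + 1:])
--             buckets.setdefault(key, []).append(i)
--     best_len = max(dp)
--     end = dp.index(best_len)  # first index attaining the maximum, as in the DP above
--     out = []
--     while end != -1:
--         out.append(words[end])
--         end = prev[end]
--     out.reverse()
--     return out
-- ===== Notes on version B (the rewrite author's own statement) =====
-- stated objective: faster
-- what changed: Replaces the all-pairs O(n^2*L) Hamming-distance scan by an incremental index of (position, word-with-that-position-deleted) buckets so each word only inspects its actual Hamming-1 neighbours (same DP, same tie-breaking: best predecessor = max dp then smallest index, end = first argmax).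
-- outside the precondition, e.g. on longestUnequalAdjacentGroupsSubsequence(['9xxz0'], []): A returns ['9xxz0'], B raises IndexError
import Mathlib
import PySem

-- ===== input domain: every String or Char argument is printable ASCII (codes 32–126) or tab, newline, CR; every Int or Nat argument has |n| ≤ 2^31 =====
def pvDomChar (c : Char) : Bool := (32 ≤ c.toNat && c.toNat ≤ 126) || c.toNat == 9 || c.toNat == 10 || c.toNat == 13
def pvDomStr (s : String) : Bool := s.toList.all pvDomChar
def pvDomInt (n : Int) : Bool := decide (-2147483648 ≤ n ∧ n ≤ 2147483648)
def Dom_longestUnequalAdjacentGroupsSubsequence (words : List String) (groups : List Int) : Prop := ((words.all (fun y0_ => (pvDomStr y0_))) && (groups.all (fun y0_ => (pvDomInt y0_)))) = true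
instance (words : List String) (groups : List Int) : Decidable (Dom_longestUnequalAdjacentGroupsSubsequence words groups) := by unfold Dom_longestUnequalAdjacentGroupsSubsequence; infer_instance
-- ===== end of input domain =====

-- B replaces A's all-pairs Hamming-distance scan with an incremental index of
-- (position, word-with-that-position-deleted) buckets, so only actual Hamming-1
-- neighbours are inspected (same DP values, same tie-breaking, same output).

-- ===== PORT A =====
-- A's helper hamming_distance; s2[k] is only read at call sites with len(s1) == len(s2),
-- where pyGet? is always `some`, so the Option comparison is exact there.
def pvHamA (s1 s2 : String) : Int :=
  (PySem.List.pyRange 0 (PySem.Str.len s1) 1).foldl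
    (fun dist k =>
      if PySem.Str.pyGet? s1 k ≠ PySem.Str.pyGet? s2 k then dist + 1 else dist) 0

-- A's reconstruction `while current_idx != -1` loop; fuel (words.length + 1) is enough
-- because prev-chains strictly decrease.
def pvChainA (fuel : Nat) (prev : List Int) (cur : Int) : List Int :=
  match fuel with
  | 0 => []
  | f + 1 => if cur = -1 then [] else cur :: pvChainA f prev (PySem.List.pyGetD prev cur 0)

def longestUnequalAdjacentGroupsSubsequence (words : List String) (groups : List Int) : List String :=
  let n : Int := PySem.List.len words
  let st := (PySem.List.pyRange 0 n 1).foldl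
    (fun (st : List Int × List Int) i =>
      (PySem.List.pyRange 0 i 1).foldl
        (fun (st : List Int × List Int) j =>
          if PySem.List.pyGetD groups j 0 ≠ PySem.List.pyGetD groups i 0 then
            if PySem.Str.len (PySem.List.pyGetD words j "") = PySem.Str.len (PySem.List.pyGetD words i "") then
              if pvHamA (PySem.List.pyGetD words j "") (PySem.List.pyGetD words i "") = 1 then
                if PySem.List.pyGetD st.1 j 0 + 1 > PySem.List.pyGetD st.1 i 0 then
                  (PySem.List.pySetD st.1 i (PySem.List.pyGetD st.1 j 0 + 1), PySem.List.pySetD st.2 i j)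
                else st
              else st
            else st
          else st) st)
    (List.replicate words.length 1, List.replicate words.length (-1))
  if n > 0 then
    let mx := (PySem.List.pyRange 0 n 1).foldl
      (fun (m : Int × Int) i =>
        if PySem.List.pyGetD st.1 i 0 > m.1 then (PySem.List.pyGetD st.1 i 0, i) else m) (1, 0)
    ((pvChainA (words.length + 1) st.2 mx.2).reverse).map (fun i => PySem.List.pyGetD words i "")
  else []

-- ===== PORT B =====
-- Source B's bucket key (k, w[:k] + w[k+1:]); represented on char lists (Python string
-- equality is exactly char-sequence equality, so dict lookups are exact).
def pvKeyB (w : List Char) (k : Int) : Int × List Char :=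
  (k, PySem.List.slice w none (some k) ++ PySem.List.slice w (some (k + 1)) none)

-- Source B's `while end != -1: out.append(words[end]); end = prev[end]` loop, same fuel bound.
def pvChainB (fuel : Nat) (words : List String) (prev : List Int) (cur : Int) : List String :=
  match fuel with
  | 0 => []
  | f + 1 =>
    if cur = -1 then []
    else PySem.List.pyGetD words cur "" :: pvChainB f words prev (PySem.List.pyGetD prev cur 0)

def longestUnequalAdjacentGroupsSubsequence_alt (words : List String) (groups : List Int) : List String :=
  let n : Int := PySem.List.len words
  if n = 0 then []
  else
    let st := (PySem.List.pyRange 0 n 1).foldl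
      (fun (st : List Int × List Int × PySem.Dict (Int × List Char) (List Int)) i =>
        let w := PySem.List.pyGetD words i ""
        let g := PySem.List.pyGetD groups i 0
        let best := (PySem.List.pyRange 0 (PySem.Str.len w) 1).foldl
          (fun (b : Int × Int) k =>
            (st.2.2.getD (pvKeyB w.toList k) []).foldl
              (fun (b : Int × Int) j =>
                if PySem.List.pyGetD words j "" ≠ w ∧ PySem.List.pyGetD groups j 0 ≠ g then
                  if PySem.List.pyGetD st.1 j 0 > b.1 ∨
                      (PySem.List.pyGetD st.1 j 0 = b.1 ∧ j < b.2) then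
                    (PySem.List.pyGetD st.1 j 0, j)
                  else b
                else b) b)
          (0, -1)
        let dp' := if best.2 ≠ -1 then PySem.List.pySetD st.1 i (best.1 + 1) else st.1
        let prev' := if best.2 ≠ -1 then PySem.List.pySetD st.2.1 i best.2 else st.2.1
        let buckets' := (PySem.List.pyRange 0 (PySem.Str.len w) 1).foldl
          (fun d k => d.modify (pvKeyB w.toList k) [] (fun l => l ++ [i])) st.2.2
        (dp', prev', buckets'))
      (List.replicate words.length 1, List.replicate words.length (-1), PySem.Dict.empty)
    -- best_len = max(dp); end = dp.index(best_len) — dp is nonempty here, so both succeed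
    let m := (PySem.List.max? st.1 (fun x => x)).getD 0
    let endIdx : Int := ((PySem.List.index? st.1 m).getD 0 : Nat)
    (pvChainB (words.length + 1) words st.2.1 endIdx).reverse

-- ===== PRECONDITION & SPEC =====
-- Pre_ excludes inputs with fewer groups than words: there both programs read past the end of
-- groups and raise IndexError, except that on a single-word input A's pair loop is empty and A
-- still returns [words[0]] while the natural B reads groups[0] up front and raises.
def Pre_longestUnequalAdjacentGroupsSubsequence (words : List String) (groups : List Int) : Prop :=
  words.length ≤ groups.length
instance (words : List String) (groups : List Int) : Decidable (Pre_longestUnequalAdjacentGroupsSubsequence words groups) := by unfold Pre_longestUnequalAdjacentGroupsSubsequence; infer_instance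

def pvWitness_longestUnequalAdjacentGroupsSubsequence : List String × List Int := (["ab", "ac"], [1, 2])

def Spec_longestUnequalAdjacentGroupsSubsequence (words : List String) (groups : List Int) (out : List String) : Prop := out = longestUnequalAdjacentGroupsSubsequence_alt words groups
instance (words : List String) (groups : List Int) (out : List String) : Decidable (Spec_longestUnequalAdjacentGroupsSubsequence words groups out) := by unfold Spec_longestUnequalAdjacentGroupsSubsequence; infer_instance

-- ===== CLAIM (what is proved, stated in full; the proofs are below) =====
def Claim_equal_longestUnequalAdjacentGroupsSubsequence : Prop := ∀ (words : List String) (groups : List Int), Dom_longestUnequalAdjacentGroupsSubsequence words groups → Pre_longestUnequalAdjacentGroupsSubsequence words groups → Spec_longestUnequalAdjacentGroupsSubsequence words groups (longestUnequalAdjacentGroupsSubsequence words groups)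

-- ===== LEMMAS AND PROOFS =====


-- "b is at most c" in the order the DP uses: larger dp value first, then smaller index
def pvLe (b c : Int × Int) : Prop := b.1 < c.1 ∨ (b.1 = c.1 ∧ c.2 ≤ b.2)

def pvStep (dp : List Int) (b : Int × Int) (j : Int) : Int × Int :=
  if PySem.List.pyGetD dp j 0 > b.1 ∨ (PySem.List.pyGetD dp j 0 = b.1 ∧ j < b.2) then
    (PySem.List.pyGetD dp j 0, j)
  else b

abbrev pvEligP (words : List String) (groups : List Int) (i j : Int) : Prop :=
  PySem.List.pyGetD groups j 0 ≠ PySem.List.pyGetD groups i 0 ∧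
  PySem.Str.len (PySem.List.pyGetD words j "") = PySem.Str.len (PySem.List.pyGetD words i "") ∧
  pvHamA (PySem.List.pyGetD words j "") (PySem.List.pyGetD words i "") = 1

def pvCands (words : List String) (groups : List Int) (i : Int) : List Int :=
  (PySem.List.pyRange 0 i 1).filter fun j => decide (pvEligP words groups i j)

def pvDP (words : List String) (groups : List Int) : Nat → List Int × List Int
  | 0 => ([], [])
  | m + 1 =>
    let p := pvDP words groups m
    let s := (pvCands words groups (m : Int)).foldl (pvStep p.1) (0, -1)
    (p.1 ++ [if s.2 = -1 then 1 else s.1 + 1], p.2 ++ [s.2])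

-- ---- the fold over pvStep is the pvLe-maximum of the start and the visited pairs ----
lemma pvLe_refl (b : Int × Int) : pvLe b b := by unfold pvLe; omega

lemma pvLe_antisymm {b c : Int × Int} (h1 : pvLe b c) (h2 : pvLe c b) : b = c := by
  unfold pvLe at h1 h2
  have : b.1 = c.1 ∧ b.2 = c.2 := by omega
  exact Prod.ext this.1 this.2

lemma pvStep_of_le {dp : List Int} {b : Int × Int} {j : Int}
    (h : pvLe (PySem.List.pyGetD dp j 0, j) b) : pvStep dp b j = b := by
  unfold pvLe at h; unfold pvStep
  rw [if_neg (by dsimp only at h; omega)]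

lemma pvStep_of_not_le {dp : List Int} {b : Int × Int} {j : Int}
    (h : ¬ pvLe (PySem.List.pyGetD dp j 0, j) b) : pvStep dp b j = (PySem.List.pyGetD dp j 0, j) := by
  unfold pvLe at h; unfold pvStep
  rw [if_pos (by dsimp only at h; omega)]

lemma pvFold_mem (dp : List Int) (l : List Int) (s0 : Int × Int) :
    l.foldl (pvStep dp) s0 ∈ s0 :: l.map (fun j => (PySem.List.pyGetD dp j 0, j)) := by
  induction l generalizing s0 with
  | nil => simp
  | cons x t ih =>
    rw [List.foldl_cons]
    by_cases h : pvLe (PySem.List.pyGetD dp x 0, x) s0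
    · rw [pvStep_of_le h]
      have := ih s0
      simp only [List.map_cons, List.mem_cons] at this ⊢; tauto
    · rw [pvStep_of_not_le h]
      have := ih (PySem.List.pyGetD dp x 0, x)
      simp only [List.map_cons, List.mem_cons] at this ⊢; tauto

lemma pvFold_ub (dp : List Int) (l : List Int) (s0 : Int × Int) :
    ∀ x ∈ s0 :: l.map (fun j => (PySem.List.pyGetD dp j 0, j)), pvLe x (l.foldl (pvStep dp) s0) := by
  induction l generalizing s0 with
  | nil =>
    intro x hx
    simp only [List.map_nil, List.mem_cons, List.not_mem_nil, or_false] at hx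
    subst hx; rw [List.foldl_nil]; exact pvLe_refl x
  | cons y t ih =>
    intro x hx
    rw [List.foldl_cons]
    simp only [List.map_cons, List.mem_cons] at hx
    by_cases h : pvLe (PySem.List.pyGetD dp y 0, y) s0
    · rw [pvStep_of_le h]
      rcases hx with h1 | h1 | h1
      · rw [h1]; exact ih s0 s0 (by simp)
      · have h2 := ih s0 s0 (by simp)
        rw [h1]; unfold pvLe at h h2 ⊢; omega
      · exact ih s0 x (List.mem_cons_of_mem _ (by simpa using h1))
    · rw [pvStep_of_not_le h]
      have key := ih (PySem.List.pyGetD dp y 0, y)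
      rcases hx with h1 | h1 | h1
      · have h2 := key (PySem.List.pyGetD dp y 0, y) (by simp)
        rw [h1]; unfold pvLe at h h2 ⊢; omega
      · rw [h1]; exact key _ (by simp)
      · exact key x (List.mem_cons_of_mem _ (by simpa using h1))

-- two candidate lists with the same members fold to the same best pair
lemma pvFold_eq_of_mem_iff (dp : List Int) (l1 l2 : List Int) (s0 : Int × Int)
    (h : ∀ j, j ∈ l1 ↔ j ∈ l2) :
    l1.foldl (pvStep dp) s0 = l2.foldl (pvStep dp) s0 := by
  have m1 := pvFold_mem dp l1 s0
  have m2 := pvFold_mem dp l2 s0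
  apply pvLe_antisymm
  · apply pvFold_ub dp l2 s0
    simp only [List.mem_cons, List.mem_map] at m1 ⊢
    rcases m1 with h1 | ⟨j, hj, hje⟩
    · exact Or.inl h1
    · exact Or.inr ⟨j, (h j).1 hj, hje⟩
  · apply pvFold_ub dp l1 s0
    simp only [List.mem_cons, List.mem_map] at m2 ⊢
    rcases m2 with h1 | ⟨j, hj, hje⟩
    · exact Or.inl h1
    · exact Or.inr ⟨j, (h j).2 hj, hje⟩

-- ---- deletion keys vs Hamming distance 1 ----
lemma pvDel_eq_iff (u v : List Char) (k : Nat) (hu : k < u.length) (hv : k < v.length) :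
    u.take k ++ u.drop (k+1) = v.take k ++ v.drop (k+1) ↔
      (u.length = v.length ∧ ∀ t : Nat, t ≠ k → u[t]? = v[t]?) := by
  constructor
  · intro h
    have hlen : (u.take k).length = (v.take k).length := by
      simp only [List.length_take]; omega
    obtain ⟨h1, h2⟩ := List.append_inj h hlen
    have hL : u.length = v.length := by
      have := congrArg List.length h2
      simp only [List.length_drop] at this; omega
    refine ⟨hL, fun t ht => ?_⟩
    rcases Nat.lt_or_ge t k with hlt | hge
    · have := congrArg (fun l => l[t]?) h1
      simpa [List.getElem?_take, hlt] using this
    · have hgt : k + 1 ≤ t := by omega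
      have := congrArg (fun l => l[t - (k+1)]?) h2
      simp only [List.getElem?_drop] at this
      rw [Nat.add_sub_cancel' hgt] at this
      exact this
  · rintro ⟨hL, h⟩
    have h1 : u.take k = v.take k := by
      apply List.ext_getElem?
      intro t
      rw [List.getElem?_take, List.getElem?_take]
      split_ifs with ht
      · exact h t (by omega)
      · rfl
    have h2 : u.drop (k+1) = v.drop (k+1) := by
      apply List.ext_getElem?
      intro t
      rw [List.getElem?_drop, List.getElem?_drop]
      exact h (k+1+t) (by omega)
    rw [h1, h2]

lemma pvHamA_eq (s1 s2 : String) :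
    pvHamA s1 s2 =
      ((List.range s1.toList.length).countP
        (fun t => decide (s1.toList[t]? ≠ s2.toList[t]?)) : Int) := by
  unfold pvHamA
  rw [PySem.Str.len_eq, PySem.List.pyRange_zero_nat, List.foldl_map]
  simp only [PySem.Str.pyGet?_natCast]
  rw [PySem.List.foldl_ite_add_one (fun t : Nat => s1.toList[t]? ≠ s2.toList[t]?)]
  simp

lemma pvHam_one_iff (u v : List Char) (hL : u.length = v.length) :
    (List.range u.length).countP (fun t => decide (u[t]? ≠ v[t]?)) = 1 ↔
      ∃ k, k < u.length ∧ u[k]? ≠ v[k]? ∧ ∀ t : Nat, t ≠ k → u[t]? = v[t]? := by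
  rw [List.countP_eq_length_filter, List.length_eq_one_iff]
  constructor
  · rintro ⟨a, ha⟩
    have hmem : a ∈ (List.range u.length).filter (fun t => decide (u[t]? ≠ v[t]?)) := by
      rw [ha]; simp
    rw [List.mem_filter, List.mem_range] at hmem
    refine ⟨a, hmem.1, by simpa using hmem.2, fun t ht => ?_⟩
    by_contra hne
    have ht2 : t < u.length := by
      by_contra h2
      push Not at h2
      have e1 : u[t]? = none := List.getElem?_eq_none h2
      have e2 : v[t]? = none := List.getElem?_eq_none (by omega)
      rw [e1, e2] at hne; exact hne rfl
    have : t ∈ (List.range u.length).filter (fun t => decide (u[t]? ≠ v[t]?)) := by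
      rw [List.mem_filter, List.mem_range]; exact ⟨ht2, by simpa using hne⟩
    rw [ha] at this; simp at this; exact ht this
  · rintro ⟨k, hk, hne, hoff⟩
    refine ⟨k, ?_⟩
    have hperm : ((List.range u.length).filter (fun t => decide (u[t]? ≠ v[t]?))).Perm [k] := by
      have hnd1 : ((List.range u.length).filter (fun t => decide (u[t]? ≠ v[t]?))).Nodup :=
        List.Nodup.filter _ List.nodup_range
      have hnd2 : ([k] : List Nat).Nodup := by simp
      rw [List.perm_ext_iff_of_nodup hnd1 hnd2]
      intro x
      rw [List.mem_filter, List.mem_range]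
      simp only [List.mem_singleton]
      constructor
      · rintro ⟨hx, hpx⟩
        by_contra hxk
        have heq := hoff x hxk
        simp [heq] at hpx
      · rintro rfl
        exact ⟨hk, by simpa using hne⟩
    have h1 := hperm.length_eq
    simp only [List.length_singleton] at h1
    obtain ⟨a, ha⟩ := List.length_eq_one_iff.1 h1
    have : a = k := by
      have : a ∈ [k] := hperm.mem_iff.1 (by rw [ha]; simp)
      simpa using this
    rw [← this]; exact ha

-- the full neighbour condition used by B equals A's eligibility test (string part)
lemma pvNeighbor_iff (u v : List Char) :
    ((∃ k : Nat, k < v.length ∧ k < u.length ∧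
        u.take k ++ u.drop (k+1) = v.take k ++ v.drop (k+1)) ∧ u ≠ v)
    ↔ (u.length = v.length ∧
        (List.range u.length).countP (fun t => decide (u[t]? ≠ v[t]?)) = 1) := by
  constructor
  · rintro ⟨⟨k, hkv, hku, hdel⟩, hne⟩
    obtain ⟨hL, hoff⟩ := (pvDel_eq_iff u v k hku hkv).1 hdel
    refine ⟨hL, (pvHam_one_iff u v hL).2 ⟨k, hku, ?_, hoff⟩⟩
    intro heq
    apply hne
    apply List.ext_getElem?
    intro t
    by_cases ht : t = k
    · rw [ht]; exact heq
    · exact hoff t ht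
  · rintro ⟨hL, hham⟩
    obtain ⟨k, hk, hne, hoff⟩ := (pvHam_one_iff u v hL).1 hham
    refine ⟨⟨k, by omega, hk, (pvDel_eq_iff u v k hk (by omega)).2 ⟨hL, hoff⟩⟩, ?_⟩
    intro heq
    exact hne (by rw [heq])

-- ---- reading/writing around the slot being relaxed ----
lemma pvGetD_mid (D : List Int) (x : Int) (r : List Int) (m : Nat) (hD : D.length = m) :
    PySem.List.pyGetD (D ++ x :: r) (m : Int) 0 = x := by
  rw [PySem.List.pyGetD_natCast, List.getD_eq_getElem?_getD,
    List.getElem?_append_right (by omega)]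
  simp [hD]

lemma pvGetD_low (D : List Int) (x : Int) (r : List Int) (t : Nat) (h : t < D.length) :
    PySem.List.pyGetD (D ++ x :: r) (t : Int) 0 = PySem.List.pyGetD D (t : Int) 0 := by
  rw [PySem.List.pyGetD_natCast, PySem.List.pyGetD_natCast]
  exact List.getD_append _ _ _ _ h

lemma pvSetD_mid (D : List Int) (x y : Int) (r : List Int) (m : Nat) (hD : D.length = m) :
    PySem.List.pySetD (D ++ x :: r) (m : Int) y = D ++ y :: r := by
  rw [PySem.List.pySetD_natCast, List.set_append]
  simp [hD]

lemma pvDP_len (words : List String) (groups : List Int) (m : Nat) :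
    (pvDP words groups m).1.length = m ∧ (pvDP words groups m).2.length = m := by
  induction m with
  | zero => simp [pvDP]
  | succ k ih => simp [pvDP, ih.1, ih.2]

-- running best over the eligible prefix
def pvS (words : List String) (groups : List Int) (D : List Int) (i t : Int) : Int × Int :=
  ((PySem.List.pyRange 0 t 1).filter
      (fun j => decide (pvEligP words groups i j))).foldl (pvStep D) (0, -1)

lemma pvS_zero (words : List String) (groups : List Int) (D : List Int) (i : Int) :
    pvS words groups D i 0 = (0, -1) := by
  unfold pvS
  rw [PySem.List.pyRange_one_eq_nil (by norm_num)]
  rfl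

lemma pvS_cases (words : List String) (groups : List Int) (D : List Int) (i t : Int) :
    pvS words groups D i t = (0, -1) ∨
      (0 ≤ (pvS words groups D i t).2 ∧ (pvS words groups D i t).2 < t) := by
  have h := pvFold_mem D ((PySem.List.pyRange 0 t 1).filter
      (fun j => decide (pvEligP words groups i j))) (0, -1)
  rcases List.mem_cons.1 h with h1 | h1
  · exact Or.inl h1
  · right
    obtain ⟨j, hj, hje⟩ := List.mem_map.1 h1
    have hj2 := PySem.List.mem_pyRange_one.1 (List.mem_of_mem_filter hj)
    unfold pvS
    rw [← hje]
    exact ⟨hj2.1, hj2.2⟩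

lemma pvS_succ (words : List String) (groups : List Int) (D : List Int) (i : Int) (t : Nat) :
    pvS words groups D i ((t : Int) + 1) =
      (if pvEligP words groups i (t : Int) then
        pvStep D (pvS words groups D i (t : Int)) (t : Int)
      else pvS words groups D i (t : Int)) := by
  unfold pvS
  rw [PySem.List.pyRange_one_succ_right (by positivity), List.filter_append, List.foldl_append,
    List.filter_singleton]
  by_cases h : pvEligP words groups i (t : Int)
  · rw [decide_eq_true h, Bool.cond_true, if_pos h, List.foldl_cons, List.foldl_nil]
  · rw [decide_eq_false h, Bool.cond_false, if_neg h, List.foldl_nil]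

-- the inner j-loop of A, as a named function (definitionally the port's lambda)
def pvStepAIn (words : List String) (groups : List Int) (i : Int)
    (st : List Int × List Int) (j : Int) : List Int × List Int :=
  if PySem.List.pyGetD groups j 0 ≠ PySem.List.pyGetD groups i 0 then
    if PySem.Str.len (PySem.List.pyGetD words j "") = PySem.Str.len (PySem.List.pyGetD words i "") then
      if pvHamA (PySem.List.pyGetD words j "") (PySem.List.pyGetD words i "") = 1 then
        if PySem.List.pyGetD st.1 j 0 + 1 > PySem.List.pyGetD st.1 i 0 then
          (PySem.List.pySetD st.1 i (PySem.List.pyGetD st.1 j 0 + 1), PySem.List.pySetD st.2 i j)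
        else st
      else st
    else st
  else st

def pvOuterA (words : List String) (groups : List Int)
    (st : List Int × List Int) (i : Int) : List Int × List Int :=
  (PySem.List.pyRange 0 i 1).foldl (pvStepAIn words groups i) st

lemma pvA_inner (words : List String) (groups : List Int) (m : Nat)
    (D P r1 r2 : List Int) (hD : D.length = m) (hP : P.length = m) :
    ∀ t : Nat, t ≤ m →
      (PySem.List.pyRange 0 (t : Int) 1).foldl (pvStepAIn words groups (m : Int))
          (D ++ 1 :: r1, P ++ (-1) :: r2)
        = (D ++ ((pvS words groups D (m : Int) (t : Int)).1 + 1) :: r1,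
           P ++ (pvS words groups D (m : Int) (t : Int)).2 :: r2) := by
  intro t
  induction t with
  | zero =>
    intro _
    rw [PySem.List.pyRange_one_eq_nil (by norm_num)]
    simp [pvS_zero]
  | succ t ih =>
    intro ht
    have ht' : t ≤ m := by omega
    have hcast : ((t + 1 : Nat) : Int) = (t : Int) + 1 := by push_cast; ring
    rw [hcast, PySem.List.pyRange_one_succ_right (by positivity), List.foldl_append,
      ih ht', List.foldl_cons, List.foldl_nil, pvS_succ]
    set s := pvS words groups D (m : Int) (t : Int) with hs
    have hlow : PySem.List.pyGetD (D ++ (s.1 + 1) :: r1) (t : Int) 0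
        = PySem.List.pyGetD D (t : Int) 0 := pvGetD_low D _ r1 t (by omega)
    have hmid : PySem.List.pyGetD (D ++ (s.1 + 1) :: r1) (m : Int) 0 = s.1 + 1 :=
      pvGetD_mid D _ r1 m hD
    have hs2 : ¬ ((t : Int) < s.2) := by
      rcases pvS_cases words groups D (m : Int) (t : Int) with h | h
      · rw [← hs] at h; rw [h]; dsimp only; omega
      · rw [← hs] at h; omega
    unfold pvStepAIn
    by_cases hel : pvEligP words groups (m : Int) (t : Int)
    · rw [if_pos hel]
      obtain ⟨h1, h2, h3⟩ := hel
      rw [if_pos h1, if_pos h2, if_pos h3]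
      dsimp only
      rw [hlow, hmid]
      by_cases hgt : PySem.List.pyGetD D (t : Int) 0 > s.1
      · rw [if_pos (by omega), pvStep_of_not_le (by unfold pvLe; dsimp only; omega)]
        rw [pvSetD_mid D _ _ r1 m hD, pvSetD_mid P _ _ r2 m hP]
      · rw [if_neg (by omega), pvStep_of_le (by unfold pvLe; dsimp only; omega)]
    · rw [if_neg hel]
      -- one of the three guards fails
      by_cases h1 : PySem.List.pyGetD groups (t : Int) 0 ≠ PySem.List.pyGetD groups (m : Int) 0
      · rw [if_pos h1]
        by_cases h2 : PySem.Str.len (PySem.List.pyGetD words (t : Int) "")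
            = PySem.Str.len (PySem.List.pyGetD words (m : Int) "")
        · rw [if_pos h2]
          by_cases h3 : pvHamA (PySem.List.pyGetD words (t : Int) "")
              (PySem.List.pyGetD words (m : Int) "") = 1
          · exact absurd ⟨h1, h2, h3⟩ hel
          · rw [if_neg h3]
        · rw [if_neg h2]
      · rw [if_neg h1]

lemma pvA_outer (words : List String) (groups : List Int) (n : Nat) :
    ∀ m : Nat, m ≤ n →
      (PySem.List.pyRange 0 (m : Int) 1).foldl (pvOuterA words groups)
          (List.replicate n 1, List.replicate n (-1))
        = ((pvDP words groups m).1 ++ List.replicate (n - m) 1,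
           (pvDP words groups m).2 ++ List.replicate (n - m) (-1)) := by
  intro m
  induction m with
  | zero =>
    intro _
    rw [PySem.List.pyRange_one_eq_nil (by norm_num)]
    simp [pvDP]
  | succ m ih =>
    intro hm
    have hm' : m ≤ n := by omega
    have hcast : ((m + 1 : Nat) : Int) = (m : Int) + 1 := by push_cast; ring
    rw [hcast, PySem.List.pyRange_one_succ_right (by positivity), List.foldl_append,
      ih hm', List.foldl_cons, List.foldl_nil]
    have hrep : n - m = (n - (m + 1)) + 1 := by omega
    rw [hrep, List.replicate_succ, List.replicate_succ]
    unfold pvOuterA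
    rw [pvA_inner words groups m (pvDP words groups m).1 (pvDP words groups m).2 _ _
      (pvDP_len words groups m).1 (pvDP_len words groups m).2 m (le_refl m)]
    have hDP : pvDP words groups (m + 1)
        = ((pvDP words groups m).1 ++ [if (pvS words groups (pvDP words groups m).1 (m : Int) (m : Int)).2 = -1 then 1
              else (pvS words groups (pvDP words groups m).1 (m : Int) (m : Int)).1 + 1],
           (pvDP words groups m).2 ++ [(pvS words groups (pvDP words groups m).1 (m : Int) (m : Int)).2]) := by
      simp only [pvDP, pvS, pvCands]
    rw [hDP]
    set s := pvS words groups (pvDP words groups m).1 (m : Int) (m : Int) with hs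
    have hmid : (if s.2 = -1 then 1 else s.1 + 1) = s.1 + 1 := by
      rcases pvS_cases words groups (pvDP words groups m).1 (m : Int) (m : Int) with h | h
      · rw [← hs] at h; rw [h]; norm_num
      · rw [← hs] at h
        rw [if_neg (by omega)]
    rw [hmid]
    simp

-- ---- B's bucket index ----
def pvPairs (words : List String) (m : Nat) : List ((Int × List Char) × Int) :=
  (PySem.List.pyRange 0 (m : Int) 1).flatMap
    (fun j => (PySem.List.pyRange 0 (PySem.Str.len (PySem.List.pyGetD words j "")) 1).map
      (fun k => (pvKeyB (PySem.List.pyGetD words j "").toList k, j)))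

def pvBuckets (words : List String) (m : Nat) : PySem.Dict (Int × List Char) (List Int) :=
  (pvPairs words m).foldl (fun d p => d.modify p.1 [] (fun l => l ++ [p.2])) PySem.Dict.empty

lemma pvBuckets_getD (words : List String) (m : Nat) (c : Int × List Char) :
    (pvBuckets words m).getD c []
      = ((pvPairs words m).filter (fun p => p.1 == c)).map (fun p => p.2) := by
  unfold pvBuckets
  rw [PySem.Dict.getD_foldl_modify_append]
  simp

lemma pvPairs_succ (words : List String) (m : Nat) :
    pvPairs words (m + 1) = pvPairs words m
      ++ (PySem.List.pyRange 0 (PySem.Str.len (PySem.List.pyGetD words (m : Int) "")) 1).map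
          (fun k => (pvKeyB (PySem.List.pyGetD words (m : Int) "").toList k, (m : Int))) := by
  unfold pvPairs
  have hcast : ((m + 1 : Nat) : Int) = (m : Int) + 1 := by push_cast; ring
  rw [hcast, PySem.List.pyRange_one_succ_right (by positivity), List.flatMap_append]
  simp

lemma pvPairs_mem (words : List String) (m : Nat) (p : (Int × List Char) × Int) :
    p ∈ pvPairs words m ↔ ∃ j : Int, 0 ≤ j ∧ j < (m : Int) ∧
      ∃ k : Int, 0 ≤ k ∧ k < PySem.Str.len (PySem.List.pyGetD words j "") ∧
        p = (pvKeyB (PySem.List.pyGetD words j "").toList k, j) := by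
  unfold pvPairs
  simp only [List.mem_flatMap, List.mem_map, PySem.List.mem_pyRange_one]
  constructor
  · rintro ⟨j, ⟨hj0, hjm⟩, k, ⟨hk0, hkL⟩, hp⟩
    exact ⟨j, hj0, hjm, k, hk0, hkL, hp.symm⟩
  · rintro ⟨j, hj0, hjm, k, hk0, hkL, hp⟩
    exact ⟨j, ⟨hj0, hjm⟩, k, ⟨hk0, hkL⟩, hp.symm⟩

lemma pvKeyB_eq (u : List Char) (k : Int) (hk : 0 ≤ k) :
    pvKeyB u k = (k, u.take k.toNat ++ u.drop (k.toNat + 1)) := by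
  unfold pvKeyB
  rw [PySem.List.slice_to u hk, PySem.List.slice_from u (by omega : (0:Int) ≤ k + 1),
    show (k + 1).toNat = k.toNat + 1 from by omega]

lemma pvBucket_mem (words : List String) (m : Nat) (c : Int × List Char) (j : Int) :
    j ∈ (pvBuckets words m).getD c [] ↔
      0 ≤ j ∧ j < (m : Int) ∧ ∃ k : Int, 0 ≤ k ∧
        k < PySem.Str.len (PySem.List.pyGetD words j "") ∧
        pvKeyB (PySem.List.pyGetD words j "").toList k = c := by
  rw [pvBuckets_getD]
  simp only [List.mem_map, List.mem_filter, beq_iff_eq]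
  constructor
  · rintro ⟨p, ⟨hp, hpc⟩, rfl⟩
    obtain ⟨j', hj0, hjm, k, hk0, hkL, rfl⟩ := (pvPairs_mem words m p).1 hp
    exact ⟨hj0, hjm, k, hk0, hkL, by simpa using hpc⟩
  · rintro ⟨hj0, hjm, k, hk0, hkL, hkey⟩
    exact ⟨(pvKeyB (PySem.List.pyGetD words j "").toList k, j),
      ⟨(pvPairs_mem words m _).2 ⟨j, hj0, hjm, k, hk0, hkL, rfl⟩, hkey⟩, rfl⟩

lemma pvStrNe_iff (a b : String) : a ≠ b ↔ a.toList ≠ b.toList :=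
  (not_congr String.toList_inj).symm

lemma pvHamA_one_iff (a b : String) :
    pvHamA a b = 1 ↔
      (List.range a.toList.length).countP
        (fun t => decide (a.toList[t]? ≠ b.toList[t]?)) = 1 := by
  rw [pvHamA_eq]; exact Nat.cast_eq_one

lemma pvStrLen_iff (a b : String) :
    PySem.Str.len a = PySem.Str.len b ↔ a.toList.length = b.toList.length := by
  rw [PySem.Str.len_eq, PySem.Str.len_eq, Nat.cast_inj]

-- the indices B's buckets hand to the relaxation at step m are exactly A's eligible j < m
lemma pvLB_mem (words : List String) (groups : List Int) (m : Nat) (j : Int) :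
    j ∈ (PySem.List.pyRange 0 (PySem.Str.len (PySem.List.pyGetD words (m : Int) "")) 1).flatMap
        (fun k => ((pvBuckets words m).getD
            (pvKeyB (PySem.List.pyGetD words (m : Int) "").toList k) []).filter
          (fun j => decide (PySem.List.pyGetD words j "" ≠ PySem.List.pyGetD words (m : Int) "" ∧
              PySem.List.pyGetD groups j 0 ≠ PySem.List.pyGetD groups (m : Int) 0)))
    ↔ j ∈ pvCands words groups (m : Int) := by
  unfold pvCands
  simp only [List.mem_flatMap, List.mem_filter, PySem.List.mem_pyRange_one, decide_eq_true_eq]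
  constructor
  · rintro ⟨k, ⟨hk0, hkL⟩, hjb, hne, hgne⟩
    obtain ⟨hj0, hjm, k', hk0', hkL', hkey⟩ := (pvBucket_mem words m _ j).1 hjb
    rw [pvKeyB_eq _ _ hk0', pvKeyB_eq _ _ hk0, Prod.mk.injEq] at hkey
    obtain ⟨rfl, hdel⟩ := hkey
    rw [PySem.Str.len_eq] at hkL hkL'
    have hnb := (pvNeighbor_iff (PySem.List.pyGetD words j "").toList
        (PySem.List.pyGetD words (m : Int) "").toList).1
      ⟨⟨k'.toNat, by omega, by omega, hdel⟩, (pvStrNe_iff _ _).1 hne⟩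
    refine ⟨⟨hj0, hjm⟩, hgne, (pvStrLen_iff _ _).2 hnb.1, (pvHamA_one_iff _ _).2 hnb.2⟩
  · rintro ⟨⟨hj0, hjm⟩, hgne, hlen, hham⟩
    have hnb := (pvNeighbor_iff (PySem.List.pyGetD words j "").toList
        (PySem.List.pyGetD words (m : Int) "").toList).2
      ⟨(pvStrLen_iff _ _).1 hlen, (pvHamA_one_iff _ _).1 hham⟩
    obtain ⟨⟨kn, hknv, hknu, hdel⟩, hneq⟩ := hnb
    refine ⟨(kn : Int), ⟨by positivity, ?_⟩, ?_, (pvStrNe_iff _ _).2 hneq, hgne⟩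
    · rw [PySem.Str.len_eq]; exact_mod_cast hknv
    · refine (pvBucket_mem words m _ j).2 ⟨hj0, hjm, (kn : Int), by positivity, ?_, ?_⟩
      · rw [PySem.Str.len_eq]; exact_mod_cast hknu
      · rw [pvKeyB_eq _ _ (by positivity), pvKeyB_eq _ _ (by positivity), Prod.mk.injEq]
        refine ⟨rfl, ?_⟩
        simpa using hdel

lemma pvGetD_low_int (D : List Int) (x : Int) (r : List Int) (j : Int)
    (h0 : 0 ≤ j) (h : j < (D.length : Int)) :
    PySem.List.pyGetD (D ++ x :: r) j 0 = PySem.List.pyGetD D j 0 := by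
  obtain ⟨t, rfl⟩ : ∃ t : Nat, j = (t : Int) := ⟨j.toNat, by omega⟩
  exact pvGetD_low D x r t (by exact_mod_cast h)

lemma pvDP_succ (words : List String) (groups : List Int) (m : Nat) :
    pvDP words groups (m + 1)
      = ((pvDP words groups m).1
           ++ [if (pvS words groups (pvDP words groups m).1 (m : Int) (m : Int)).2 = -1 then 1
               else (pvS words groups (pvDP words groups m).1 (m : Int) (m : Int)).1 + 1],
         (pvDP words groups m).2
           ++ [(pvS words groups (pvDP words groups m).1 (m : Int) (m : Int)).2]) := by
  simp only [pvDP, pvS, pvCands]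

-- the per-index step of B, as a named function (definitionally the port's lambda)
def pvStepB (words : List String) (groups : List Int)
    (st : List Int × List Int × PySem.Dict (Int × List Char) (List Int)) (i : Int) :
    List Int × List Int × PySem.Dict (Int × List Char) (List Int) :=
  let w := PySem.List.pyGetD words i ""
  let g := PySem.List.pyGetD groups i 0
  let best := (PySem.List.pyRange 0 (PySem.Str.len w) 1).foldl
    (fun (b : Int × Int) k =>
      (st.2.2.getD (pvKeyB w.toList k) []).foldl
        (fun (b : Int × Int) j =>
          if PySem.List.pyGetD words j "" ≠ w ∧ PySem.List.pyGetD groups j 0 ≠ g then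
            if PySem.List.pyGetD st.1 j 0 > b.1 ∨
                (PySem.List.pyGetD st.1 j 0 = b.1 ∧ j < b.2) then
              (PySem.List.pyGetD st.1 j 0, j)
            else b
          else b) b)
    (0, -1)
  let dp' := if best.2 ≠ -1 then PySem.List.pySetD st.1 i (best.1 + 1) else st.1
  let prev' := if best.2 ≠ -1 then PySem.List.pySetD st.2.1 i best.2 else st.2.1
  let buckets' := (PySem.List.pyRange 0 (PySem.Str.len w) 1).foldl
    (fun d k => d.modify (pvKeyB w.toList k) [] (fun l => l ++ [i])) st.2.2
  (dp', prev', buckets')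

lemma pvB_step (words : List String) (groups : List Int) (n' m : Nat) :
    pvStepB words groups
        ((pvDP words groups m).1 ++ 1 :: List.replicate n' 1,
         (pvDP words groups m).2 ++ (-1) :: List.replicate n' (-1),
         pvBuckets words m) (m : Int)
      = ((pvDP words groups (m + 1)).1 ++ List.replicate n' 1,
         (pvDP words groups (m + 1)).2 ++ List.replicate n' (-1),
         pvBuckets words (m + 1)) := by
  set D := (pvDP words groups m).1 with hDdef
  set P := (pvDP words groups m).2 with hPdef
  have hlenD : D.length = m := (pvDP_len words groups m).1
  have hlenP : P.length = m := (pvDP_len words groups m).2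
  unfold pvStepB
  dsimp only
  -- 1. the relaxation pass: replace the raw dp-array reads by reads of D, pull the guard
  --    into a filter, flatten the bucket walk, and identify it with the spec fold pvS
  have hIn : ∀ (k : Int) (b : Int × Int),
      ((pvBuckets words m).getD (pvKeyB (PySem.List.pyGetD words (m : Int) "").toList k) []).foldl
        (fun (b : Int × Int) j =>
          if PySem.List.pyGetD words j "" ≠ PySem.List.pyGetD words (m : Int) "" ∧
              PySem.List.pyGetD groups j 0 ≠ PySem.List.pyGetD groups (m : Int) 0 then
            if PySem.List.pyGetD (D ++ 1 :: List.replicate n' 1) j 0 > b.1 ∨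
                (PySem.List.pyGetD (D ++ 1 :: List.replicate n' 1) j 0 = b.1 ∧ j < b.2) then
              (PySem.List.pyGetD (D ++ 1 :: List.replicate n' 1) j 0, j)
            else b
          else b) b
      = (((pvBuckets words m).getD (pvKeyB (PySem.List.pyGetD words (m : Int) "").toList k) []).filter
          (fun j => decide (PySem.List.pyGetD words j "" ≠ PySem.List.pyGetD words (m : Int) "" ∧
              PySem.List.pyGetD groups j 0 ≠ PySem.List.pyGetD groups (m : Int) 0))).foldl
          (pvStep D) b := by
    intro k b
    rw [PySem.List.foldl_congr_mem _ _
      (fun (b : Int × Int) j =>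
        if PySem.List.pyGetD words j "" ≠ PySem.List.pyGetD words (m : Int) "" ∧
            PySem.List.pyGetD groups j 0 ≠ PySem.List.pyGetD groups (m : Int) 0 then
          pvStep D b j
        else b) b ?_]
    · exact PySem.List.foldl_ite_eq_foldl_filter _ _ _ _
    · intro acc x hx
      obtain ⟨hx0, hxm, -⟩ := (pvBucket_mem words m _ x).1 hx
      rw [pvGetD_low_int D 1 (List.replicate n' 1) x hx0 (by rw [hlenD]; exact hxm)]
      rfl
  rw [PySem.List.foldl_congr_mem _ _
    (fun (b : Int × Int) k =>
      (((pvBuckets words m).getD (pvKeyB (PySem.List.pyGetD words (m : Int) "").toList k) []).filter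
        (fun j => decide (PySem.List.pyGetD words j "" ≠ PySem.List.pyGetD words (m : Int) "" ∧
            PySem.List.pyGetD groups j 0 ≠ PySem.List.pyGetD groups (m : Int) 0))).foldl
        (pvStep D) b) (0, -1) (fun acc x _ => hIn x acc),
    ← List.foldl_flatMap,
    pvFold_eq_of_mem_iff D _ (pvCands words groups (m : Int)) (0, -1)
      (pvLB_mem words groups m)]
  have hSdef : (pvCands words groups (m : Int)).foldl (pvStep D) (0, -1)
      = pvS words groups D (m : Int) (m : Int) := rfl
  rw [hSdef]
  -- 2. the bucket update appends exactly the pairs of index m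
  have hbuck : (PySem.List.pyRange 0 (PySem.Str.len (PySem.List.pyGetD words (m : Int) "")) 1).foldl
      (fun d k => PySem.Dict.modify d (pvKeyB (PySem.List.pyGetD words (m : Int) "").toList k) []
        (fun l => l ++ [(m : Int)])) (pvBuckets words m)
      = pvBuckets words (m + 1) := by
    conv_rhs => rw [pvBuckets, pvPairs_succ, List.foldl_append, List.foldl_map, ← pvBuckets]
  rw [hbuck]
  -- 3. the dp/prev slot updates
  rw [pvDP_succ words groups m, ← hDdef, ← hPdef]
  set s := pvS words groups D (m : Int) (m : Int) with hs
  by_cases h2 : s.2 = -1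
  · have hs0 : s = (0, -1) := by
      rcases pvS_cases words groups D (m : Int) (m : Int) with h | h
      · rw [← hs] at h; exact h
      · rw [← hs] at h; omega
    rw [if_neg (by rw [hs0]; simp), if_neg (by rw [hs0]; simp), if_pos h2, h2]
    simp
  · rw [if_pos h2, if_pos h2, if_neg h2,
      pvSetD_mid D _ _ _ m hlenD, pvSetD_mid P _ _ _ m hlenP]
    simp

lemma pvB_outer (words : List String) (groups : List Int) (n : Nat) :
    ∀ m : Nat, m ≤ n →
      (PySem.List.pyRange 0 (m : Int) 1).foldl (pvStepB words groups)
          (List.replicate n 1, List.replicate n (-1), PySem.Dict.empty)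
        = ((pvDP words groups m).1 ++ List.replicate (n - m) 1,
           (pvDP words groups m).2 ++ List.replicate (n - m) (-1),
           pvBuckets words m) := by
  intro m
  induction m with
  | zero =>
    intro _
    rw [PySem.List.pyRange_one_eq_nil (by norm_num)]
    have hb0 : pvBuckets words 0 = PySem.Dict.empty := by
      unfold pvBuckets pvPairs
      rw [PySem.List.pyRange_one_eq_nil (by norm_num)]
      rfl
    simp [pvDP, hb0]
  | succ m ih =>
    intro hm
    have hm' : m ≤ n := by omega
    have hcast : ((m + 1 : Nat) : Int) = (m : Int) + 1 := by push_cast; ring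
    rw [hcast, PySem.List.pyRange_one_succ_right (by positivity), List.foldl_append,
      ih hm', List.foldl_cons, List.foldl_nil]
    have hrep : n - m = (n - (m + 1)) + 1 := by omega
    rw [hrep, List.replicate_succ, List.replicate_succ]
    exact pvB_step words groups (n - (m + 1)) m

-- ---- the closing phase: first argmax, max/index, and the reconstruction walk ----
lemma pvMax_fold (D : List Int) (h0 : D.getD 0 0 = 1) :
    ∀ t : Nat, 1 ≤ t → t ≤ D.length →
      ∃ I : Nat, I < t ∧
        (PySem.List.pyRange 0 (t : Int) 1).foldl
            (fun (m : Int × Int) i =>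
              if PySem.List.pyGetD D i 0 > m.1 then (PySem.List.pyGetD D i 0, i) else m) (1, 0)
          = (D.getD I 0, (I : Int)) ∧
        (∀ u : Nat, u < t → D.getD u 0 ≤ D.getD I 0) ∧
        (∀ u : Nat, u < I → D.getD u 0 < D.getD I 0) := by
  intro t
  induction t with
  | zero => omega
  | succ t ih =>
    intro _ hlen
    by_cases ht : t = 0
    · subst ht
      refine ⟨0, by omega, ?_, ?_, by omega⟩
      · rw [show ((0 + 1 : Nat) : Int) = 0 + 1 from by norm_num,
          PySem.List.pyRange_one_singleton, List.foldl_cons, List.foldl_nil,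
          PySem.List.pyGetD_zero, h0]
        norm_num
      · intro u hu
        interval_cases u
        omega
    · obtain ⟨I, hIt, hfold, hub, hstrict⟩ := ih (by omega) (by omega)
      have hcast : ((t + 1 : Nat) : Int) = (t : Int) + 1 := by push_cast; ring
      rw [hcast, PySem.List.pyRange_one_succ_right (by positivity), List.foldl_append,
        hfold, List.foldl_cons, List.foldl_nil, PySem.List.pyGetD_natCast]
      by_cases hgt : D.getD t 0 > D.getD I 0
      · rw [if_pos hgt]
        refine ⟨t, by omega, rfl, ?_, ?_⟩
        · intro u hu
          rcases Nat.lt_or_ge u t with h | h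
          · exact le_of_lt (lt_of_le_of_lt (hub u h) hgt)
          · have : u = t := by omega
            rw [this]
        · intro u hu
          exact lt_of_le_of_lt (hub u hu) hgt
      · rw [if_neg hgt]
        refine ⟨I, by omega, rfl, ?_, hstrict⟩
        intro u hu
        rcases Nat.lt_or_ge u t with h | h
        · exact hub u h
        · have : u = t := by omega
          rw [this]; omega

lemma pvMaxIndex (D : List Int) (I : Nat) (hI : I < D.length)
    (hub : ∀ u : Nat, u < D.length → D.getD u 0 ≤ D.getD I 0)
    (hstrict : ∀ u : Nat, u < I → D.getD u 0 < D.getD I 0) :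
    (((PySem.List.index? D ((PySem.List.max? D (fun x => x)).getD 0)).getD 0 : Nat) : Int)
      = (I : Int) := by
  obtain ⟨M, hM⟩ : ∃ M, PySem.List.max? D (fun x => x) = some M := by
    cases hmax : PySem.List.max? D (fun x => x) with
    | none =>
      rw [PySem.List.max?_eq_none_iff] at hmax
      subst hmax; simp at hI
    | some M => exact ⟨M, rfl⟩
  have hMub := PySem.List.max?_isMax hM
  have hMmem := PySem.List.max?_mem hM
  have hIval : D.getD I 0 = D[I] := List.getD_eq_getElem D 0 hI
  have hIle : D.getD I 0 ≤ M := hMub _ (hIval ▸ List.getElem_mem hI)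
  have hMle : M ≤ D.getD I 0 := by
    obtain ⟨u, hu, hue⟩ := List.mem_iff_getElem.1 hMmem
    have := hub u hu
    rw [List.getD_eq_getElem D 0 hu, hue] at this
    exact this
  have hMI : M = D.getD I 0 := le_antisymm hMle hIle
  have hidx : PySem.List.index? D M = some I := by
    rw [PySem.List.index?_eq_some_iff]
    refine ⟨D.take I, D.drop (I + 1), ?_, ?_, ?_⟩
    · rw [hMI, hIval, ← List.drop_eq_getElem_cons hI, List.take_append_drop]
    · simp [List.length_take]; omega
    · intro hmem
      obtain ⟨u, hu, hue⟩ := List.mem_iff_getElem.1 hmem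
      rw [List.getElem_take] at hue
      have hu2 : u < I := by
        have h3 := hu
        simp only [List.length_take, lt_min_iff] at h3
        exact h3.1
      have := hstrict u hu2
      rw [List.getD_eq_getElem D 0 (by omega)] at this
      rw [hue, hMI] at this
      omega
  rw [hM]
  simp only [Option.getD_some]
  rw [hidx]
  simp

lemma pvChainB_eq_map (f : Nat) (words : List String) (prev : List Int) (cur : Int) :
    pvChainB f words prev cur
      = (pvChainA f prev cur).map (fun i => PySem.List.pyGetD words i "") := by
  induction f generalizing cur with
  | zero => rfl
  | succ f ih =>
    unfold pvChainA pvChainB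
    by_cases h : cur = -1
    · simp [h]
    · simp [h, ih]

lemma pvDP_getD0 (words : List String) (groups : List Int) (m : Nat) (hm : 1 ≤ m) :
    (pvDP words groups m).1.getD 0 0 = 1 := by
  induction m with
  | zero => omega
  | succ m ih =>
    rw [pvDP_succ]
    by_cases h : m = 0
    · subst h
      have : pvDP words groups 0 = ([], []) := rfl
      rw [this]
      simp [pvS_zero]
    · rw [List.getD_append _ _ _ _ (by rw [(pvDP_len words groups m).1]; omega)]
      exact ih (by omega)

-- ---- the master equality ----
lemma pv_main (words : List String) (groups : List Int) :
    longestUnequalAdjacentGroupsSubsequence words groups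
      = longestUnequalAdjacentGroupsSubsequence_alt words groups := by
  have hA : longestUnequalAdjacentGroupsSubsequence words groups =
      (let st := (PySem.List.pyRange 0 (PySem.List.len words) 1).foldl (pvOuterA words groups)
          (List.replicate words.length 1, List.replicate words.length (-1));
       if PySem.List.len words > 0 then
         ((pvChainA (words.length + 1) st.2
            ((PySem.List.pyRange 0 (PySem.List.len words) 1).foldl
              (fun (m : Int × Int) i =>
                if PySem.List.pyGetD st.1 i 0 > m.1 then (PySem.List.pyGetD st.1 i 0, i) else m)
              (1, 0)).2).reverse).map (fun i => PySem.List.pyGetD words i "")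
       else []) := rfl
  have hB : longestUnequalAdjacentGroupsSubsequence_alt words groups =
      (if PySem.List.len words = 0 then []
       else
         let st := (PySem.List.pyRange 0 (PySem.List.len words) 1).foldl (pvStepB words groups)
            (List.replicate words.length 1, List.replicate words.length (-1), PySem.Dict.empty);
         (pvChainB (words.length + 1) words st.2.1
            (((PySem.List.index? st.1 ((PySem.List.max? st.1 (fun x => x)).getD 0)).getD 0 : Nat) : Int)).reverse) := rfl
  rw [hA, hB]
  rw [PySem.List.len_eq]
  set n := words.length with hn
  by_cases hn0 : n = 0
  · rw [hn0]
    norm_num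
  · rw [if_pos (by omega : (0:Int) < (n:Int)), if_neg (by omega : ¬((n:Int) = 0))]
    dsimp only
    rw [pvA_outer words groups n n (le_refl n), pvB_outer words groups n n (le_refl n)]
    simp only [Nat.sub_self, List.replicate_zero, List.append_nil]
    set D := (pvDP words groups n).1 with hDdef
    set P := (pvDP words groups n).2 with hPdef
    have hlenD : D.length = n := (pvDP_len words groups n).1
    obtain ⟨I, hIt, hfold, hub, hstrict⟩ :=
      pvMax_fold D (pvDP_getD0 words groups n (by omega)) n (by omega) (by omega)
    rw [hfold]
    rw [pvMaxIndex D I (by omega) (fun u hu => hub u (by omega)) hstrict]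
    rw [pvChainB_eq_map]
    rw [List.map_reverse]

-- ===== VERDICT (by name: the statement is the Claim_ definition above) =====
theorem longestUnequalAdjacentGroupsSubsequence_spec : Claim_equal_longestUnequalAdjacentGroupsSubsequence := by
  intro words groups _ _
  exact pv_main words groups
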